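-- pv_equiv track=rewrite | github.com/shivang257/LeetCode-Daily-Practice-Problem-Solutions | Array Removals - GFG/array-removals.py | removals
-- ===== SOURCE A (Python) =====
-- def removals(arr, n, k):
-- 	# code here
-- 	arr.sort()
-- 	ans=-10**9
-- 	for i in range(n):
-- 	    for j in range(n):
-- 	        if arr[j]-arr[i]<=k:
-- 	            ans=max(ans,j-i+1)
-- 	return n-ans
-- ===== SOURCE B (Python) =====
-- def removals(arr, n, k):
--     a = sorted(arr)
--     j = 0
--     best = 0
--     for i in range(n):
--         while a[i] - a[j] > k:
--             j += 1
--         best = max(best, i - j + 1)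
--     return n - best
-- ===== Notes on version B (the rewrite author's own statement) =====
-- stated objective: faster
-- what changed: A scans all O(n^2) index pairs of the sorted array for the longest window with max-min <= k; B sorts once and finds that window with a single two-pointer sliding-window pass.
-- intended difference: For n = 0 the loops never run and A returns 0 - (-10**9) = 1000000000 straight from its sentinel; B returns 0, the intended value since considering no elements requires no removals. — e.g. on removals([], 0, 0): A returns 1000000000, B returns 0
-- outside the precondition, e.g. on removals([1, 5], 2, -4): A returns 2, B raises IndexError; on removals([1, 2], -1, 0): A returns 999999999, B returns -1
import Mathlib
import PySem

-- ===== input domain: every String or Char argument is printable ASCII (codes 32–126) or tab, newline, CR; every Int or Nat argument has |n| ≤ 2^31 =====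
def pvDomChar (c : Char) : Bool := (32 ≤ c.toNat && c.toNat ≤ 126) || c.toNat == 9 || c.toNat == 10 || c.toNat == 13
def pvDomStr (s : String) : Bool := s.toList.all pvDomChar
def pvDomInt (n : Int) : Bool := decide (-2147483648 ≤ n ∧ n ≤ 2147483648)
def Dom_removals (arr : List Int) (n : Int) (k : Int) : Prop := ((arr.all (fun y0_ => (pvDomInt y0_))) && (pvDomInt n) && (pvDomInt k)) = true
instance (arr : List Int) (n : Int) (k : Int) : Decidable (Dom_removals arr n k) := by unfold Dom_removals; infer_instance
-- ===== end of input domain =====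

-- B replaces A's quadratic double scan over all index pairs by a sort + single two-pointer sliding
-- window (objective: faster, O(n^2) loop → O(n) after sorting). Python A sorts `arr` in place (a
-- caller-visible mutation B reproduces only on a copy); the equivalence proved is about the return value.

-- ===== PORT A =====
def removals (arr : List Int) (n : Int) (k : Int) : Int :=
  let a := PySem.List.sorted arr (fun x => x) false
  let ans := (PySem.List.pyRange 0 n 1).foldl (fun ans i =>
      (PySem.List.pyRange 0 n 1).foldl (fun ans j =>
        if PySem.List.pyGetD a j 0 - PySem.List.pyGetD a i 0 ≤ k then max ans (j - i + 1)
        else ans) ans)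
    (-(10 ^ 9 : Int))
  n - ans

-- ===== PORT B =====
-- the loop `while a[i] - a[j] > k: j += 1`; fuel (= len(a)) only bounds the recursion, inside
-- Pre_ the loop condition itself fails at some j ≤ i < len(a) before fuel runs out
def advanceJ (a : List Int) (ai : Int) (k : Int) : Int → Nat → Int
  | j, 0 => j
  | j, fuel + 1 =>
    if ai - PySem.List.pyGetD a j 0 > k then advanceJ a ai k (j + 1) fuel else j

-- one iteration of B's `for i in range(n)` loop over the state (j, best)
def bStep (a : List Int) (k : Int) (s : Int × Int) (i : Int) : Int × Int :=
  let j := advanceJ a (PySem.List.pyGetD a i 0) k s.1 a.length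
  (j, max s.2 (i - j + 1))

def removals_alt (arr : List Int) (n : Int) (k : Int) : Int :=
  let a := PySem.List.sorted arr (fun x => x) false
  let s := (PySem.List.pyRange 0 n 1).foldl (bStep a k) ((0 : Int), (0 : Int))
  n - s.2

-- ===== PRECONDITION & SPEC =====
-- Pre_ restricts to the problem's natural domain: 0 ≤ n ≤ len(arr) (A raises IndexError for
-- n > len(arr); a negative element count is outside the task) and k ≥ 0 as the GFG problem
-- guarantees (for k < 0 B's window scan raises IndexError while A returns window "lengths" ≤ 0
-- dominated by its -10^9 sentinel).
def Pre_removals (arr : List Int) (n : Int) (k : Int) : Prop :=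
  0 ≤ n ∧ n ≤ (arr.length : Int) ∧ 0 ≤ k
instance (arr : List Int) (n : Int) (k : Int) : Decidable (Pre_removals arr n k) := by
  unfold Pre_removals; infer_instance

def pvWitness_removals : List Int × Int × Int := ([1, 3, 4, 9, 10, 11, 12, 17, 20], 9, 4)

-- For n = 0 A's loops never run and it returns 0 - (-10^9) = 1000000000 straight from its
-- sentinel; B returns 0, the intended value: considering no elements requires no removals.
def D_removals (arr : List Int) (n : Int) (k : Int) : Prop := n = 0
instance (arr : List Int) (n : Int) (k : Int) : Decidable (D_removals arr n k) := by
  unfold D_removals; infer_instance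

def Spec_removals (arr : List Int) (n : Int) (k : Int) (out : Int) : Prop :=
  ¬ D_removals arr n k → out = removals_alt arr n k
instance (arr : List Int) (n : Int) (k : Int) (out : Int) : Decidable (Spec_removals arr n k out) := by
  unfold Spec_removals; infer_instance

def pvDiffWitness_removals : List Int × Int × Int := ([], 0, 0)
def pvDiffWitnessOut_removals : Int × Int := (1000000000, 0)

-- ===== CLAIM (what is proved, stated in full; the proofs are below) =====
def Claim_unchanged_removals : Prop := ∀ (arr : List Int) (n : Int) (k : Int), Dom_removals arr n k → Pre_removals arr n k → Spec_removals arr n k (removals arr n k)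
def Claim_changed_removals : Prop := Dom_removals (pvDiffWitness_removals.1) (pvDiffWitness_removals.2.1) (pvDiffWitness_removals.2.2) ∧ Pre_removals (pvDiffWitness_removals.1) (pvDiffWitness_removals.2.1) (pvDiffWitness_removals.2.2) ∧ D_removals (pvDiffWitness_removals.1) (pvDiffWitness_removals.2.1) (pvDiffWitness_removals.2.2) ∧ removals (pvDiffWitness_removals.1) (pvDiffWitness_removals.2.1) (pvDiffWitness_removals.2.2) = pvDiffWitnessOut_removals.1 ∧ removals_alt (pvDiffWitness_removals.1) (pvDiffWitness_removals.2.1) (pvDiffWitness_removals.2.2) = pvDiffWitnessOut_removals.2 ∧ pvDiffWitnessOut_removals.1 ≠ pvDiffWitnessOut_removals.2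
def Claim_exact_removals : Prop := ∀ (arr : List Int) (n : Int) (k : Int), Dom_removals arr n k → Pre_removals arr n k → D_removals arr n k → removals arr n k ≠ removals_alt arr n k

-- ===== LEMMAS AND PROOFS =====

-- generic: a fold keeping the running max of `v x` over the elements satisfying `c`
theorem foldl_ifmax_spec (L : List Int) (c : Int → Prop) [DecidablePred c] (v : Int → Int)
    (init : Int) :
    init ≤ L.foldl (fun acc x => if c x then max acc (v x) else acc) init ∧
    (∀ x ∈ L, c x → v x ≤ L.foldl (fun acc x => if c x then max acc (v x) else acc) init) ∧
    (L.foldl (fun acc x => if c x then max acc (v x) else acc) init = init ∨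
      ∃ x ∈ L, c x ∧ L.foldl (fun acc x => if c x then max acc (v x) else acc) init = v x) := by
  induction L generalizing init with
  | nil => simp
  | cons y t ih =>
    simp only [List.foldl_cons]
    by_cases hc : c y
    · simp only [if_pos hc]
      obtain ⟨h1, h2, h3⟩ := ih (max init (v y))
      refine ⟨le_trans (le_max_left _ _) h1, ?_, ?_⟩
      · intro x hx hcx
        rcases List.mem_cons.mp hx with rfl | hx
        · exact le_trans (le_max_right _ _) h1
        · exact h2 x hx hcx
      · rcases h3 with h3 | ⟨x, hx, hcx, heq⟩
        · rcases le_total (v y) init with h | h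
          · rw [h3, max_eq_left h]; left; rfl
          · right; exact ⟨y, List.mem_cons_self, hc, by rw [h3, max_eq_right h]⟩
        · right; exact ⟨x, List.mem_cons_of_mem _ hx, hcx, heq⟩
    · simp only [if_neg hc]
      obtain ⟨h1, h2, h3⟩ := ih init
      refine ⟨h1, ?_, ?_⟩
      · intro x hx hcx
        rcases List.mem_cons.mp hx with rfl | hx
        · exact absurd hcx hc
        · exact h2 x hx hcx
      · rcases h3 with h3 | ⟨x, hx, hcx, heq⟩
        · left; exact h3
        · right; exact ⟨x, List.mem_cons_of_mem _ hx, hcx, heq⟩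
theorem foldl2_ifmax_spec (L1 L2 : List Int) (c : Int → Int → Prop)
    [inst : ∀ i j, Decidable (c i j)] (v : Int → Int → Int) (init : Int) :
    init ≤ L1.foldl (fun acc i => L2.foldl
        (fun acc j => if c i j then max acc (v i j) else acc) acc) init ∧
    (∀ i ∈ L1, ∀ j ∈ L2, c i j → v i j ≤ L1.foldl (fun acc i => L2.foldl
        (fun acc j => if c i j then max acc (v i j) else acc) acc) init) ∧
    (L1.foldl (fun acc i => L2.foldl
        (fun acc j => if c i j then max acc (v i j) else acc) acc) init = init ∨
      ∃ i ∈ L1, ∃ j ∈ L2, c i j ∧ L1.foldl (fun acc i => L2.foldl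
        (fun acc j => if c i j then max acc (v i j) else acc) acc) init = v i j) := by
  induction L1 generalizing init with
  | nil => simp
  | cons y t ih =>
    simp only [List.foldl_cons]
    obtain ⟨g1, g2, g3⟩ := foldl_ifmax_spec L2 (c y) (v y) init
    obtain ⟨h1, h2, h3⟩ := ih (L2.foldl (fun acc j => if c y j then max acc (v y j) else acc) init)
    refine ⟨le_trans g1 h1, ?_, ?_⟩
    · intro i hi j hj hcij
      rcases List.mem_cons.mp hi with rfl | hi
      · exact le_trans (g2 j hj hcij) h1
      · exact h2 i hi j hj hcij
    · rcases h3 with h3 | ⟨i, hi, j, hj, hcij, heq⟩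
      · rcases g3 with g3 | ⟨j, hj, hcj, geq⟩
        · left; rw [h3, g3]
        · right; exact ⟨y, List.mem_cons_self, j, hj, hcj, by rw [h3, geq]⟩
      · right; exact ⟨i, List.mem_cons_of_mem _ hi, j, hj, hcij, heq⟩
theorem pyGetD_sorted_mono (arr : List Int) {l r : Int} (h0 : 0 ≤ l) (hlr : l ≤ r)
    (hr : r < ((PySem.List.sorted arr (fun x => x) false).length : Int)) :
    PySem.List.pyGetD (PySem.List.sorted arr (fun x => x) false) l 0 ≤
      PySem.List.pyGetD (PySem.List.sorted arr (fun x => x) false) r 0 := by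
  rw [PySem.List.pyGetD_eq_getElem _ _ h0 (lt_of_le_of_lt hlr hr),
      PySem.List.pyGetD_eq_getElem _ _ (le_trans h0 hlr) hr]
  exact PySem.List.sorted_id_getElem_mono arr (by omega) (by omega)
theorem advanceJ_spec (a : List Int) (ai k : Int) :
    ∀ (fuel : Nat) (j : Int), (∃ t : Nat, t ≤ fuel ∧ ai - PySem.List.pyGetD a (j + (t : Int)) 0 ≤ k) →
      ai - PySem.List.pyGetD a (advanceJ a ai k j fuel) 0 ≤ k ∧
      j ≤ advanceJ a ai k j fuel ∧
      ∀ l, j ≤ l → l < advanceJ a ai k j fuel → ¬ (ai - PySem.List.pyGetD a l 0 ≤ k) := by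
  intro fuel
  induction fuel with
  | zero =>
    intro j ⟨t, ht, hC⟩
    have ht0 : t = 0 := Nat.le_zero.mp ht
    subst ht0
    simp only [advanceJ]
    refine ⟨by simpa using hC, le_refl _, ?_⟩
    intro l h1 h2; omega
  | succ fuel ih =>
    intro j ⟨t, ht, hC⟩
    simp only [advanceJ]
    by_cases h : ai - PySem.List.pyGetD a j 0 > k
    · rw [if_pos h]
      have ht1 : t ≠ 0 := by
        intro h0; subst h0; simp at hC; omega
      have hstop : ∃ t' : Nat, t' ≤ fuel ∧ ai - PySem.List.pyGetD a (j + 1 + (t' : Int)) 0 ≤ k := by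
        refine ⟨t - 1, by omega, ?_⟩
        have he : j + 1 + ((t - 1 : Nat) : Int) = j + (t : Int) := by
          push_cast [Nat.cast_sub (Nat.one_le_iff_ne_zero.mpr ht1)]; ring
        rw [he]; exact hC
      obtain ⟨ih1, ih2, ih3⟩ := ih (j + 1) hstop
      refine ⟨ih1, by omega, ?_⟩
      intro l h1 h2
      rcases eq_or_lt_of_le h1 with rfl | h1'
      · omega
      · exact ih3 l (by omega) h2
    · rw [if_neg h]
      exact ⟨by omega, le_refl _, fun l h1 h2 => by omega⟩
theorem B_loop_inv (arr : List Int) (k : Int) (hk : 0 ≤ k) (m : Nat)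
    (hm : m ≤ arr.length) :
    0 ≤ ((PySem.List.pyRange 0 (m : Int) 1).foldl (bStep (PySem.List.sorted arr (fun x => x) false) k) ((0 : Int), (0 : Int))).1 ∧
    0 ≤ ((PySem.List.pyRange 0 (m : Int) 1).foldl (bStep (PySem.List.sorted arr (fun x => x) false) k) ((0 : Int), (0 : Int))).2 ∧
    (m = 0 → (PySem.List.pyRange 0 (m : Int) 1).foldl (bStep (PySem.List.sorted arr (fun x => x) false) k) ((0 : Int), (0 : Int)) = ((0 : Int), (0 : Int))) ∧
    (1 ≤ m → ((PySem.List.pyRange 0 (m : Int) 1).foldl (bStep (PySem.List.sorted arr (fun x => x) false) k) ((0 : Int), (0 : Int))).1 ≤ (m : Int) - 1 ∧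
      (∀ l : Int, 0 ≤ l → l < ((PySem.List.pyRange 0 (m : Int) 1).foldl (bStep (PySem.List.sorted arr (fun x => x) false) k) ((0 : Int), (0 : Int))).1 →
        ¬ (PySem.List.pyGetD (PySem.List.sorted arr (fun x => x) false) ((m : Int) - 1) 0 -
            PySem.List.pyGetD (PySem.List.sorted arr (fun x => x) false) l 0 ≤ k))) ∧
    (∀ l r : Int, 0 ≤ l → l < (m : Int) → 0 ≤ r → r < (m : Int) →
      PySem.List.pyGetD (PySem.List.sorted arr (fun x => x) false) r 0 -
        PySem.List.pyGetD (PySem.List.sorted arr (fun x => x) false) l 0 ≤ k →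
      r - l + 1 ≤ ((PySem.List.pyRange 0 (m : Int) 1).foldl (bStep (PySem.List.sorted arr (fun x => x) false) k) ((0 : Int), (0 : Int))).2) ∧
    (1 ≤ m → ∃ l r : Int, 0 ≤ l ∧ l ≤ r ∧ r < (m : Int) ∧
      PySem.List.pyGetD (PySem.List.sorted arr (fun x => x) false) r 0 -
        PySem.List.pyGetD (PySem.List.sorted arr (fun x => x) false) l 0 ≤ k ∧
      ((PySem.List.pyRange 0 (m : Int) 1).foldl (bStep (PySem.List.sorted arr (fun x => x) false) k) ((0 : Int), (0 : Int))).2 = r - l + 1) := by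
  induction m with
  | zero =>
    have h0 : PySem.List.pyRange 0 ((0 : Nat) : Int) 1 = [] := by
      simp [PySem.List.pyRange_one_eq_nil]
    rw [h0, List.foldl_nil]
    refine ⟨le_refl _, le_refl _, fun _ => rfl, fun h => absurd h (by omega), ?_,
      fun h => absurd h (by omega)⟩
    intro l r h1 h2 _ _ _
    exact absurd h2 (by simpa using not_lt.mpr h1)
  | succ m ih =>
    have hm' : m ≤ arr.length := by omega
    obtain ⟨ih1, ih2, ih3, ih4, ih5, ih6⟩ := ih hm'
    have hcast : ((m + 1 : Nat) : Int) = (m : Int) + 1 := by push_cast; ring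
    have hrange : PySem.List.pyRange 0 ((m + 1 : Nat) : Int) 1 =
        PySem.List.pyRange 0 (m : Int) 1 ++ [(m : Int)] := by
      rw [hcast]; exact PySem.List.pyRange_one_succ_right (by positivity)
    rw [hrange, List.foldl_append, List.foldl_cons, List.foldl_nil]
    set a := PySem.List.sorted arr (fun x => x) false with ha
    set s := (PySem.List.pyRange 0 (m : Int) 1).foldl (bStep a k) ((0 : Int), (0 : Int)) with hsdef
    set j' := advanceJ a (PySem.List.pyGetD a (m : Int) 0) k s.1 a.length with hj'def
    have hb : bStep a k s (m : Int) = (j', max s.2 ((m : Int) - j' + 1)) := rfl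
    rw [hb]
    have hlen : a.length = arr.length := PySem.List.length_sorted arr (fun x => x) false
    have hmlen : (m : Int) < (a.length : Int) := by rw [hlen]; exact_mod_cast Nat.lt_of_lt_of_le (Nat.lt_succ_self m) hm
    have hCmm : PySem.List.pyGetD a (m : Int) 0 - PySem.List.pyGetD a (m : Int) 0 ≤ k := by omega
    have hs1m : s.1 ≤ (m : Int) := by
      by_cases h0 : m = 0
      · have := ih3 h0; rw [this]; simp
      · have := (ih4 (by omega)).1; omega
    have hstop : ∃ t : Nat, t ≤ a.length ∧
        PySem.List.pyGetD a (m : Int) 0 - PySem.List.pyGetD a (s.1 + (t : Int)) 0 ≤ k := by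
      refine ⟨((m : Int) - s.1).toNat, by omega, ?_⟩
      have he : s.1 + ((((m : Int) - s.1).toNat : Int)) = (m : Int) := by omega
      rw [he]; exact hCmm
    obtain ⟨hj'C, hj'ge, hj'min⟩ := advanceJ_spec a (PySem.List.pyGetD a (m : Int) 0) k a.length s.1 hstop
    rw [← hj'def] at hj'C hj'ge hj'min
    have hj'0 : 0 ≤ j' := le_trans ih1 hj'ge
    have hj'le : j' ≤ (m : Int) := by
      by_contra hcon
      exact hj'min (m : Int) hs1m (by omega) hCmm
    have hpref : ∀ l : Int, 0 ≤ l → l < j' →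
        ¬ (PySem.List.pyGetD a (m : Int) 0 - PySem.List.pyGetD a l 0 ≤ k) := by
      intro l hl0 hlj
      by_cases hls : l < s.1
      · have h1m : 1 ≤ m := by
          by_contra h0
          have hm0 : m = 0 := by omega
          have := ih3 hm0; rw [this] at hls; simp at hls; omega
        have hprev := (ih4 h1m).2 l hl0 hls
        intro hcon
        apply hprev
        have hmono := pyGetD_sorted_mono arr (l := (m : Int) - 1) (r := (m : Int))
          (by omega) (by omega) hmlen
        rw [← ha] at hmono
        omega
      · exact hj'min l (by omega) hlj
    refine ⟨hj'0, le_trans ih2 (le_max_left _ _), by omega, ?_, ?_, ?_⟩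
    · intro _
      constructor
      · simp only [hcast]; omega
      · intro l hl0 hlj
        have he : ((m + 1 : Nat) : Int) - 1 = (m : Int) := by omega
        rw [he]
        exact hpref l hl0 hlj
    · intro l r hl0 hlm hr0 hrm hC
      rw [hcast] at hlm hrm
      by_cases hrlt : r < (m : Int)
      · by_cases hlm2 : l < (m : Int)
        · exact le_trans (ih5 l r hl0 hlm2 hr0 hrlt hC) (le_max_left _ _)
        · have hval : r - l + 1 ≤ 0 := by omega
          exact le_trans hval (le_trans ih2 (le_max_left _ _))
      · have hr : r = (m : Int) := by omega
        subst hr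
        have hlge : j' ≤ l := by
          by_contra hcon
          exact hpref l hl0 (by omega) hC
        have hv : (m : Int) - l + 1 ≤ (m : Int) - j' + 1 := by omega
        exact le_trans hv (le_max_right _ _)
    · intro _
      by_cases hcase : (m : Int) - j' + 1 ≤ s.2
      · have h1m : 1 ≤ m := by
          by_contra h0
          have hm0 : m = 0 := by omega
          have hs2 : s.2 = 0 := by rw [ih3 hm0]
          rw [hm0] at hcase hj'le
          simp only [Nat.cast_zero] at hcase hj'le
          omega
        obtain ⟨l, r, hl0, hlr, hrm, hC, heq⟩ := ih6 h1m
        exact ⟨l, r, hl0, hlr, by omega, hC, by rw [max_eq_left hcase]; exact heq⟩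
      · refine ⟨j', (m : Int), hj'0, hj'le, by omega, hj'C, ?_⟩
        rw [max_eq_right (le_of_lt (not_le.mp hcase))]
-- ===== VERDICT (by name: the statement is the Claim_ definition above) =====
theorem removals_spec : Claim_unchanged_removals := by
  intro arr n k _ hpre hnd
  obtain ⟨hn0, hnlen, hk⟩ := hpre
  have hnz : n ≠ 0 := by simpa [D_removals] using hnd
  have hn1 : 1 ≤ n := by omega
  simp only [removals, removals_alt]
  obtain ⟨hA1, hA2, hA3⟩ := foldl2_ifmax_spec (PySem.List.pyRange 0 n 1) (PySem.List.pyRange 0 n 1)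
    (fun i j => PySem.List.pyGetD (PySem.List.sorted arr (fun x => x) false) j 0 -
      PySem.List.pyGetD (PySem.List.sorted arr (fun x => x) false) i 0 ≤ k)
    (fun i j => j - i + 1) (-(10 ^ 9 : Int))
  have hmn : ((n.toNat : Nat) : Int) = n := Int.toNat_of_nonneg hn0
  have hmlen : n.toNat ≤ arr.length := by omega
  obtain ⟨i1, i2, i3, i4, i5, i6⟩ := B_loop_inv arr k hk n.toNat hmlen
  rw [hmn] at i1 i2 i4 i5 i6
  have h1n : 1 ≤ n.toNat := by omega
  obtain ⟨l, r, hl0, hlr, hrn, hC, heq⟩ := i6 h1n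
  have h00 : (0 : Int) ∈ PySem.List.pyRange 0 n 1 :=
    PySem.List.mem_pyRange_one.mpr ⟨le_refl 0, by omega⟩
  have le1 : (PySem.List.pyRange 0 n 1).foldl (fun acc i => (PySem.List.pyRange 0 n 1).foldl
      (fun acc j => if (fun i j => PySem.List.pyGetD (PySem.List.sorted arr (fun x => x) false) j 0 -
        PySem.List.pyGetD (PySem.List.sorted arr (fun x => x) false) i 0 ≤ k) i j
        then max acc ((fun i j => j - i + 1) i j) else acc) acc) (-(10 ^ 9 : Int)) ≤
      ((PySem.List.pyRange 0 n 1).foldl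
        (bStep (PySem.List.sorted arr (fun x => x) false) k) ((0 : Int), (0 : Int))).2 := by
    rcases hA3 with h | ⟨i, hi, j, hj, hC', heq'⟩
    · rw [h]
      exact le_trans (by norm_num) i2
    · obtain ⟨hi0, hin⟩ := PySem.List.mem_pyRange_one.mp hi
      obtain ⟨hj0, hjn⟩ := PySem.List.mem_pyRange_one.mp hj
      rw [heq']
      exact i5 i j hi0 hin hj0 hjn hC'
  have le2 : ((PySem.List.pyRange 0 n 1).foldl
      (bStep (PySem.List.sorted arr (fun x => x) false) k) ((0 : Int), (0 : Int))).2 ≤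
      (PySem.List.pyRange 0 n 1).foldl (fun acc i => (PySem.List.pyRange 0 n 1).foldl
      (fun acc j => if (fun i j => PySem.List.pyGetD (PySem.List.sorted arr (fun x => x) false) j 0 -
        PySem.List.pyGetD (PySem.List.sorted arr (fun x => x) false) i 0 ≤ k) i j
        then max acc ((fun i j => j - i + 1) i j) else acc) acc) (-(10 ^ 9 : Int)) := by
    rw [heq]
    have hlmem : l ∈ PySem.List.pyRange 0 n 1 :=
      PySem.List.mem_pyRange_one.mpr ⟨hl0, by omega⟩
    have hrmem : r ∈ PySem.List.pyRange 0 n 1 :=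
      PySem.List.mem_pyRange_one.mpr ⟨by omega, hrn⟩
    exact hA2 l hlmem r hrmem hC
  exact congrArg (fun x => n - x) (le_antisymm le1 le2)
theorem removals_changed : Claim_changed_removals := by
  unfold Claim_changed_removals; decide

theorem removals_tight : Claim_exact_removals := by
  intro arr n k _ _ hd
  have hn : n = 0 := hd
  subst hn
  simp [removals, removals_alt, PySem.List.pyRange_one_eq_nil (le_refl (0 : Int))]
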